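-- pv_equiv track=rewrite | github.com/elixirrjob1/cursorskills | .cursor/skills/source-system-analyser/scripts/flat/tabular_schema_json.py | _suggest_role
-- ===== SOURCE A (Python) =====
-- def _suggest_role(headers: list[str]) -> dict[str, str | None]:
--     s = set(headers)
--
--     def pick(*opts: str) -> str | None:
--         for o in opts:
--             if o in s:
--                 return o
--         return None
--
--     return {
--         "table": pick("table", "table_name", "entity", "object"),
--         "column": pick("column", "column_name", "name", "field", "attribute"),
--         "type": pick("type", "data_type", "dtype", "column_type"),
--         "schema": pick("schema", "schema_name"),
--         "primary_key": pick("primary_key", "pk"),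
--         "foreign_key": pick("foreign_key", "fk"),
--     }
-- ===== SOURCE B (Python) =====
-- _ROLE_OPTIONS = [
--     ("table", ["table", "table_name", "entity", "object"]),
--     ("column", ["column", "column_name", "name", "field", "attribute"]),
--     ("type", ["type", "data_type", "dtype", "column_type"]),
--     ("schema", ["schema", "schema_name"]),
--     ("primary_key", ["primary_key", "pk"]),
--     ("foreign_key", ["foreign_key", "fk"]),
-- ]
--
-- # Inverted index: candidate header name -> (role, priority index in that role's option list).
-- _LOOKUP = {name: (role, i)
--            for role, opts in _ROLE_OPTIONS
--            for i, name in enumerate(opts)}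
--
--
-- def _suggest_role(headers: list[str]) -> dict[str, str | None]:
--     result = {role: None for role, _ in _ROLE_OPTIONS}
--     best = {}  # role -> best (lowest) priority index seen so far
--     for h in headers:
--         hit = _LOOKUP.get(h)
--         if hit is not None:
--             role, i = hit
--             if role not in best or i < best[role]:
--                 result[role] = h
--                 best[role] = i
--     return result
-- ===== Notes on version B (the rewrite author's own statement) =====
-- stated objective: alternative
-- what changed: Replaces A's six per-role scans over option lists (each probing the header set) by a single inverted name->(role,priority) dictionary built once and one pass over the headers that keeps the best (lowest) priority per role, with all six role keys pre-initialised to None.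
import Mathlib
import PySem

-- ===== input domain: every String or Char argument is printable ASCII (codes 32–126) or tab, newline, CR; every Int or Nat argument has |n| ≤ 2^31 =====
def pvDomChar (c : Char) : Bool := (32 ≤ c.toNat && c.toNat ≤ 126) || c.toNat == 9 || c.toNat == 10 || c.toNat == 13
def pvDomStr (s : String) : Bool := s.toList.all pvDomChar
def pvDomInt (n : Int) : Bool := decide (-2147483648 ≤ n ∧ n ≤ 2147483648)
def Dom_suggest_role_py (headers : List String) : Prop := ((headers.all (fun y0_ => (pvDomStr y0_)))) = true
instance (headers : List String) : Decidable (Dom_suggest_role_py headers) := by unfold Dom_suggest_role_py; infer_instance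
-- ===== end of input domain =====

-- B replaces A's per-role first-hit scans over the option lists by a single inverted
-- name -> (role, priority) index and one pass over the headers keeping the best
-- priority per role (objective: alternative decomposition, same exact result).

-- ===== PORT A =====
-- A's inner helper pick(*opts): first option that is in the header set.
def pickA (s : PySem.Set String) : List String → Option String
  | [] => none
  | o :: rest => if PySem.Set.contains s o then some o else pickA s rest

def suggest_role_py (headers : List String) : List (String × Option String) :=
  let s := PySem.Set.ofList headers
  [("table", pickA s ["table", "table_name", "entity", "object"]),
   ("column", pickA s ["column", "column_name", "name", "field", "attribute"]),
   ("type", pickA s ["type", "data_type", "dtype", "column_type"]),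
   ("schema", pickA s ["schema", "schema_name"]),
   ("primary_key", pickA s ["primary_key", "pk"]),
   ("foreign_key", pickA s ["foreign_key", "fk"])]

-- ===== PORT B =====
-- B's module-level inverted index _LOOKUP: header name -> (role, priority index).
def lookupB : PySem.Dict String (String × Nat) :=
  PySem.Dict.ofList
    [("table", ("table", 0)), ("table_name", ("table", 1)), ("entity", ("table", 2)),
     ("object", ("table", 3)),
     ("column", ("column", 0)), ("column_name", ("column", 1)), ("name", ("column", 2)),
     ("field", ("column", 3)), ("attribute", ("column", 4)),
     ("type", ("type", 0)), ("data_type", ("type", 1)), ("dtype", ("type", 2)),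
     ("column_type", ("type", 3)),
     ("schema", ("schema", 0)), ("schema_name", ("schema", 1)),
     ("primary_key", ("primary_key", 0)), ("pk", ("primary_key", 1)),
     ("foreign_key", ("foreign_key", 0)), ("fk", ("foreign_key", 1))]

-- body of B's for-loop over headers: state = (result, best)
def stepB (st : PySem.Dict String (Option String) × PySem.Dict String Nat) (h : String) :
    PySem.Dict String (Option String) × PySem.Dict String Nat :=
  match PySem.Dict.get? lookupB h with
  | none => st
  | some (role, i) =>
    match PySem.Dict.get? st.2 role with
    | none => (PySem.Dict.insert st.1 role (some h), PySem.Dict.insert st.2 role i)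
    | some b =>
      if i < b then (PySem.Dict.insert st.1 role (some h), PySem.Dict.insert st.2 role i)
      else st

def initResult : PySem.Dict String (Option String) :=
  PySem.Dict.ofList
    [("table", none), ("column", none), ("type", none),
     ("schema", none), ("primary_key", none), ("foreign_key", none)]

def suggest_role_py_alt (headers : List String) : List (String × Option String) :=
  (headers.foldl stepB (initResult, PySem.Dict.empty)).1.items

-- ===== PRECONDITION & SPEC =====
def Spec_suggest_role_py (headers : List String) (out : List (String × Option String)) : Prop := out = suggest_role_py_alt headers
instance (headers : List String) (out : List (String × Option String)) : Decidable (Spec_suggest_role_py headers out) := by unfold Spec_suggest_role_py; infer_instance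

-- ===== CLAIM (what is proved, stated in full; the proofs are below) =====
def Claim_equal_suggest_role_py : Prop := ∀ (headers : List String), Dom_suggest_role_py headers → Spec_suggest_role_py headers (suggest_role_py headers)

-- ===== LEMMAS AND PROOFS =====

-- the six roles, in A's (and B's) output order, and each role's option list
def rolesL : List String := ["table", "column", "type", "schema", "primary_key", "foreign_key"]

def optsOf (r : String) : List String :=
  if r = "table" then ["table", "table_name", "entity", "object"]
  else if r = "column" then ["column", "column_name", "name", "field", "attribute"]
  else if r = "type" then ["type", "data_type", "dtype", "column_type"]
  else if r = "schema" then ["schema", "schema_name"]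
  else if r = "primary_key" then ["primary_key", "pk"]
  else if r = "foreign_key" then ["foreign_key", "fk"]
  else []

-- per-role view of the inverted index
def idxR (r : String) (h : String) : Option Nat :=
  match PySem.Dict.get? lookupB h with
  | some (r', i) => if r' = r then some i else none
  | none => none

-- one step of B's best-priority tracking for a single role
def step1 (b : Option Nat) (io : Option Nat) : Option Nat :=
  match io with
  | none => b
  | some i =>
    match b with
    | none => some i
    | some bb => if i < bb then some i else b

def bestFold (idx : String → Option Nat) (hs : List String) (b : Option Nat) : Option Nat :=
  hs.foldl (fun b h => step1 b (idx h)) b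

def optMin : Option Nat → Option Nat → Option Nat
  | none, m => m
  | some b, none => some b
  | some b, some m => some (min b m)

def fidx (p : String → Bool) : List String → Option Nat
  | [] => none
  | o :: rest => if p o then some 0 else (fidx p rest).map (· + 1)

def valOf (opts : List String) (m : Option Nat) : Option String :=
  m.map (fun i => opts.getD i "")

theorem step1_none (b : Option Nat) : step1 b none = b := rfl

theorem step1_eq_optMin (b io : Option Nat) : step1 b io = optMin b io := by
  cases io with
  | none => cases b <;> rfl
  | some i =>
    cases b with
    | none => rfl
    | some bb =>
      simp only [step1, optMin]
      split_ifs with hlt <;> (congr 1; omega)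

theorem optMin_assoc (a b c : Option Nat) :
    optMin (optMin a b) c = optMin a (optMin b c) := by
  cases a <;> cases b <;> cases c <;> try rfl
  simp only [optMin]
  congr 1
  omega

theorem bestFold_merge (idx : String → Option Nat) (hs : List String) (b : Option Nat) :
    bestFold idx hs b = optMin b (bestFold idx hs none) := by
  induction hs generalizing b with
  | nil => cases b <;> rfl
  | cons h t ih =>
    have e1 : bestFold idx (h :: t) b = bestFold idx t (step1 b (idx h)) := rfl
    have e2 : bestFold idx (h :: t) none = bestFold idx t (step1 none (idx h)) := rfl
    rw [e1, e2, ih, ih (step1 none (idx h))]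
    have e3 : step1 none (idx h) = idx h := by cases idx h <;> rfl
    rw [e3, step1_eq_optMin, optMin_assoc]

theorem bestFold_cons (idx : String → Option Nat) (h : String) (t : List String) :
    bestFold idx (h :: t) none = optMin (idx h) (bestFold idx t none) := by
  have e1 : bestFold idx (h :: t) none = bestFold idx t (step1 none (idx h)) := rfl
  have e2 : step1 none (idx h) = idx h := by cases idx h <;> rfl
  rw [e1, e2, bestFold_merge]

theorem optMin_map_succ (a b : Option Nat) :
    optMin (a.map (· + 1)) (b.map (· + 1)) = (optMin a b).map (· + 1) := by
  cases a <;> cases b <;> simp [optMin]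

theorem optMin_zero_left (m : Option Nat) : optMin (some 0) m = some 0 := by
  cases m <;> simp [optMin]

theorem optMin_zero_right (m : Option Nat) : optMin m (some 0) = some 0 := by
  cases m <;> simp [optMin]

theorem fidx_union (q p : String → Bool) (l : List String) :
    optMin (fidx q l) (fidx p l) = fidx (fun o => q o || p o) l := by
  induction l with
  | nil => rfl
  | cons o rest ih =>
    cases hq : q o <;> cases hp : p o <;>
      simp only [fidx, hq, hp, Bool.false_or, Bool.true_or, Bool.or_self,
        if_true, if_false, Bool.false_eq_true, ite_false, ite_true] <;>
      first
        | rfl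
        | rw [← ih, optMin_map_succ]
        | exact optMin_zero_right _
        | exact optMin_zero_left _

theorem fidx_false (l : List String) : fidx (fun _ => false) l = none := by
  induction l with
  | nil => rfl
  | cons o rest ih => simp [fidx, ih]

theorem bestFold_eq_fidx (idx : String → Option Nat) (opts : List String)
    (E : ∀ h, idx h = fidx (fun o => o == h) opts) (hs : List String) :
    bestFold idx hs none = fidx (fun o => hs.contains o) opts := by
  induction hs with
  | nil =>
    have : (fun o : String => (([] : List String).contains o)) = fun _ => false := by
      funext o; simp
    rw [show bestFold idx [] none = none from rfl, this, fidx_false]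
  | cons h t ih =>
    have hp : (fun o : String => (o == h || t.contains o)) = fun o => (h :: t).contains o := by
      funext o; simp [List.contains_cons, beq_eq_decide]
    rw [bestFold_cons, ih, E h, fidx_union, hp]

theorem valOf_fidx (p : String → Bool) (opts : List String) :
    valOf opts (fidx p opts) = opts.find? p := by
  induction opts with
  | nil => rfl
  | cons o rest ih =>
    cases hp : p o
    · have hfind : List.find? p (o :: rest) = List.find? p rest := by
        simp [List.find?_cons, hp]
      rw [hfind, ← ih]
      simp only [fidx, hp, Bool.false_eq_true, ite_false]
      cases fidx p rest <;> simp [valOf]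
    · simp [fidx, hp, valOf, List.find?_cons]

theorem pickA_eq_find? (hs : List String) (opts : List String) :
    pickA (PySem.Set.ofList hs) opts = opts.find? (fun o => hs.contains o) := by
  induction opts with
  | nil => simp [pickA]
  | cons o rest ih =>
    by_cases hm : o ∈ hs
    · simp [pickA, PySem.Set.contains_iff, PySem.Set.mem_ofList, hm, ih]
    · simp [pickA, PySem.Set.contains_iff, PySem.Set.mem_ofList, hm, ih]

theorem lookupB_mk : lookupB = PySem.Dict.mk
    [("table", ("table", 0)), ("table_name", ("table", 1)), ("entity", ("table", 2)),
     ("object", ("table", 3)),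
     ("column", ("column", 0)), ("column_name", ("column", 1)), ("name", ("column", 2)),
     ("field", ("column", 3)), ("attribute", ("column", 4)),
     ("type", ("type", 0)), ("data_type", ("type", 1)), ("dtype", ("type", 2)),
     ("column_type", ("type", 3)),
     ("schema", ("schema", 0)), ("schema_name", ("schema", 1)),
     ("primary_key", ("primary_key", 0)), ("pk", ("primary_key", 1)),
     ("foreign_key", ("foreign_key", 0)), ("fk", ("foreign_key", 1))] := by decide

theorem idxR_split (h role : String) (i : Nat)
    (G : PySem.Dict.get? lookupB h = some (role, i)) (r : String) :
    idxR r h = if r = role then some i else none := by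
  unfold idxR
  rw [G]
  show (if role = r then some i else none) = if r = role then some i else none
  by_cases hr : r = role
  · subst hr; simp
  · rw [if_neg (fun e : role = r => hr e.symm), if_neg hr]

theorem idxR_of_none (h : String) (G : PySem.Dict.get? lookupB h = none) (r : String) :
    idxR r h = none := by
  unfold idxR; rw [G]

def namesL : List String :=
  ["table", "table_name", "entity", "object",
   "column", "column_name", "name", "field", "attribute",
   "type", "data_type", "dtype", "column_type",
   "schema", "schema_name", "primary_key", "pk", "foreign_key", "fk"]

theorem get?_none_of_not_name (h : String) (hm : h ∉ namesL) :
    PySem.Dict.get? lookupB h = none := by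
  rw [lookupB_mk, PySem.Dict.get?_eq_none_iff_not_mem_keys]
  simpa [namesL, PySem.Dict.keys, or_comm] using hm

theorem lookup_sound (h role : String) (i : Nat)
    (G : PySem.Dict.get? lookupB h = some (role, i)) :
    role ∈ rolesL ∧ (optsOf role).getD i "" = h := by
  by_cases hm : h ∈ namesL
  · simp only [namesL, List.mem_cons, List.not_mem_nil, or_false] at hm
    rcases hm with rfl|rfl|rfl|rfl|rfl|rfl|rfl|rfl|rfl|rfl|rfl|rfl|rfl|rfl|rfl|rfl|rfl|rfl|rfl <;>
      (rw [lookupB_mk] at G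
       simp only [PySem.Dict.get?_mk_cons, String.reduceBEq, reduceIte,
         Option.some.injEq, Prod.mk.injEq] at G
       obtain ⟨rfl, rfl⟩ := G
       decide)
  · rw [get?_none_of_not_name h hm] at G
    cases G

theorem idxR_eq_fidx (r : String) (hr : r ∈ rolesL) (h : String) :
    idxR r h = fidx (fun o => o == h) (optsOf r) := by
  by_cases hm : h ∈ namesL
  · simp only [namesL, List.mem_cons, List.not_mem_nil, or_false] at hm
    fin_cases hr <;>
      rcases hm with rfl|rfl|rfl|rfl|rfl|rfl|rfl|rfl|rfl|rfl|rfl|rfl|rfl|rfl|rfl|rfl|rfl|rfl|rfl <;>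
      decide
  · have h0 : idxR r h = none := idxR_of_none h (get?_none_of_not_name h hm) r
    rw [h0]
    simp only [namesL, List.mem_cons, List.not_mem_nil, or_false, not_or] at hm
    fin_cases hr <;>
      (simp only [optsOf, String.reduceEq, reduceIte, ite_true, ite_false]
       simp [fidx, beq_iff_eq]
       split_ifs <;> simp_all)

theorem mainInv (hs : List String) :
    ∀ (st : PySem.Dict String (Option String) × PySem.Dict String Nat)
      (B : String → Option Nat),
      st.1.items = rolesL.map (fun r => (r, valOf (optsOf r) (B r))) →
      (∀ r, PySem.Dict.get? st.2 r = B r) →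
      (hs.foldl stepB st).1.items =
        rolesL.map (fun r => (r, valOf (optsOf r) (bestFold (idxR r) hs (B r)))) := by
  induction hs with
  | nil => intro st B h1 _; simpa [bestFold] using h1
  | cons h t ih =>
    intro st B h1 h2
    have hcons : ∀ r b, bestFold (idxR r) (h :: t) b = bestFold (idxR r) t (step1 b (idxR r h)) :=
      fun _ _ => rfl
    rw [List.foldl_cons]
    cases G : PySem.Dict.get? lookupB h with
    | none =>
      have hstep : stepB st h = st := by unfold stepB; rw [G]
      rw [hstep]
      simp only [hcons, idxR_of_none h G, step1_none]
      exact ih st B h1 h2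
    | some p =>
      obtain ⟨role, i⟩ := p
      obtain ⟨hrole, hv⟩ := lookup_sound h role i G
      have hsplit := idxR_split h role i G
      have hkeys : st.1.keys = rolesL := by
        simp only [PySem.Dict.keys, h1, List.map_map]
        rfl
      have hcontains : st.1.contains role = true := by
        rw [PySem.Dict.contains_iff_mem_keys, hkeys]; exact hrole
      -- the three branches of B's update
      have main : ∀ (st' : PySem.Dict String (Option String) × PySem.Dict String Nat)
          (Bn : String → Option Nat),
          st'.1.items = rolesL.map (fun r => (r, valOf (optsOf r) (Bn r))) →
          (∀ r, PySem.Dict.get? st'.2 r = Bn r) →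
          (∀ r, step1 (B r) (idxR r h) = Bn r) →
          (t.foldl stepB st').1.items =
            rolesL.map (fun r => (r, valOf (optsOf r) (bestFold (idxR r) (h :: t) (B r)))) := by
        intro st' Bn a1 a2 a3
        simp only [hcons, a3]
        exact ih st' Bn a1 a2
      have hupd : (PySem.Dict.insert st.1 role (some h)).items =
          rolesL.map (fun r => (r, valOf (optsOf r)
            (if r = role then some i else B r))) := by
        rw [PySem.Dict.items_insert_of_contains st.1 (some h) hcontains, h1, List.map_map]
        apply List.map_congr_left
        intro r _
        by_cases hx : r = role
        · subst hx
          simp only [Function.comp_apply, beq_self_eq_true, if_pos rfl, ite_true]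
          refine Prod.ext rfl ?_
          simp only [valOf, Option.map_some]
          exact congrArg some hv.symm
        · simp [Function.comp, hx, valOf]
      have hget : ∀ r, PySem.Dict.get? (PySem.Dict.insert st.2 role i) r =
          (if r = role then some i else B r) := by
        intro r
        by_cases hx : r = role
        · subst hx; simp [PySem.Dict.get?_insert_self]
        · rw [PySem.Dict.get?_insert_of_ne st.2 i hx, h2 r, if_neg hx]
      cases hb : B role with
      | none =>
        have hstep : stepB st h =
            (PySem.Dict.insert st.1 role (some h), PySem.Dict.insert st.2 role i) := by
          simp only [stepB, G, h2 role, hb]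
        rw [hstep]
        refine main _ (fun r => if r = role then some i else B r) hupd hget ?_
        intro r
        show step1 (B r) (idxR r h) = if r = role then some i else B r
        rw [hsplit r]
        by_cases hx : r = role
        · subst hx; rw [if_pos rfl, if_pos rfl, hb]; rfl
        · rw [if_neg hx, if_neg hx, step1_none]
      | some bb =>
        by_cases hlt : i < bb
        · have hstep : stepB st h =
              (PySem.Dict.insert st.1 role (some h), PySem.Dict.insert st.2 role i) := by
            simp only [stepB, G, h2 role, hb, if_pos hlt]
          rw [hstep]
          refine main _ (fun r => if r = role then some i else B r) hupd hget ?_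
          intro r
          show step1 (B r) (idxR r h) = if r = role then some i else B r
          rw [hsplit r]
          by_cases hx : r = role
          · subst hx; rw [if_pos rfl, if_pos rfl, hb]; simp [step1, hlt]
          · rw [if_neg hx, if_neg hx, step1_none]
        · have hstep : stepB st h = st := by
            simp only [stepB, G, h2 role, hb, if_neg hlt]
          rw [hstep]
          refine main st B h1 h2 ?_
          intro r
          rw [hsplit r]
          by_cases hx : r = role
          · subst hx; rw [if_pos rfl, hb]; simp [step1, hlt]
          · rw [if_neg hx, step1_none]

-- ===== VERDICT (by name: the statement is the Claim_ definition above) =====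
theorem suggest_role_py_spec : Claim_equal_suggest_role_py := by
  unfold Claim_equal_suggest_role_py Spec_suggest_role_py
  intro hs _
  unfold suggest_role_py suggest_role_py_alt
  rw [mainInv hs (initResult, PySem.Dict.empty) (fun _ => none) (by decide)
        (fun r => by simp [PySem.Dict.get?_empty])]
  have key : ∀ r, r ∈ rolesL → valOf (optsOf r) (bestFold (idxR r) hs none) =
      (optsOf r).find? (fun o => hs.contains o) := by
    intro r hr
    rw [bestFold_eq_fidx _ _ (idxR_eq_fidx r hr), valOf_fidx]
  simp only [rolesL, List.map_cons, List.map_nil]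
  rw [key "table" (by simp [rolesL]), key "column" (by simp [rolesL]),
      key "type" (by simp [rolesL]), key "schema" (by simp [rolesL]),
      key "primary_key" (by simp [rolesL]), key "foreign_key" (by simp [rolesL])]
  simp only [optsOf, if_pos, if_neg, String.reduceEq, ite_true, ite_false, reduceIte]
  rw [pickA_eq_find?, pickA_eq_find?, pickA_eq_find?, pickA_eq_find?,
      pickA_eq_find?, pickA_eq_find?]
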